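-- pv_equiv track=rewrite | github.com/JoelvanIngen/Competitive-Green-Coding | db/src/db/db_handler.py | translate_tags_to_bitmap
-- ===== SOURCE A (Python) =====
-- def translate_tags_to_bitmap(tags: list[str]) -> int:
--     bitmap = 0
--
--     for tag in tags:
--         if tag == "C":
--             bitmap += 1 << 0
--         elif tag == "python":
--             bitmap += 1 << 1
--
--     return bitmap
-- ===== SOURCE B (Python) =====
-- def translate_tags_to_bitmap(tags: list[str]) -> int:
--     counts = {}
--     for tag in tags:
--         counts[tag] = counts.get(tag, 0) + 1
--     return counts.get("C", 0) * (1 << 0) + counts.get("python", 0) * (1 << 1)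
-- ===== Notes on version B (the rewrite author's own statement) =====
-- stated objective: alternative
-- what changed: Replaces the running-bitmap loop with per-tag if/elif branches by a branch-free tabulation pass that builds a frequency dictionary of all tags, followed by one closed-form combination of the two relevant counts multiplied by their bit weights (preserving duplicate accumulation).
import Mathlib
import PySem

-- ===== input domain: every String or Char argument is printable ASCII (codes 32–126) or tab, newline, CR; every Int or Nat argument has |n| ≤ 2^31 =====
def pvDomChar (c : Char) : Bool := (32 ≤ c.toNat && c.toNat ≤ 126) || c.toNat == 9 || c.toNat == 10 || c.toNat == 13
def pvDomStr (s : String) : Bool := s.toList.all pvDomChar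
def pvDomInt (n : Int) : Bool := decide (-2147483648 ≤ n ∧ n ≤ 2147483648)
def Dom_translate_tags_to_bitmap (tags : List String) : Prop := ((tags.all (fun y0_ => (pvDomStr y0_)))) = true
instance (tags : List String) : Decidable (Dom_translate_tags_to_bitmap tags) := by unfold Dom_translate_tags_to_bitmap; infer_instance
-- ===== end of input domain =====

-- B first tabulates a frequency dictionary of all tags, then combines the two relevant counts arithmetically (same result, different decomposition).

-- ===== PORT A =====
def translate_tags_to_bitmap (tags : List String) : Int :=
  tags.foldl (fun bitmap tag =>
    if tag = "C" then bitmap + ((1 : Int) <<< 0)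
    else if tag = "python" then bitmap + ((1 : Int) <<< 1)
    else bitmap) 0

-- ===== PORT B =====
def translate_tags_to_bitmap_alt (tags : List String) : Int :=
  let counts : PySem.Dict String Int :=
    tags.foldl (fun d tag => d.insert tag (d.getD tag 0 + 1)) PySem.Dict.empty
  counts.getD "C" 0 * ((1 : Int) <<< 0) + counts.getD "python" 0 * ((1 : Int) <<< 1)

-- ===== PRECONDITION & SPEC =====
def Spec_translate_tags_to_bitmap (tags : List String) (out : Int) : Prop := out = translate_tags_to_bitmap_alt tags
instance (tags : List String) (out : Int) : Decidable (Spec_translate_tags_to_bitmap tags out) := by unfold Spec_translate_tags_to_bitmap; infer_instance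

-- ===== CLAIM (what is proved, stated in full; the proofs are below) =====
def Claim_equal_translate_tags_to_bitmap : Prop := ∀ (tags : List String), Dom_translate_tags_to_bitmap tags → Spec_translate_tags_to_bitmap tags (translate_tags_to_bitmap tags)

-- ===== LEMMAS AND PROOFS =====

-- B's counting fold, from any dictionary: the final count of a key is its start count plus its multiplicity in the list.
theorem countsFold_getD (tags : List String) (d : PySem.Dict String Int) (k : String) :
    (tags.foldl (fun d tag => d.insert tag (d.getD tag 0 + 1)) d).getD k 0
      = d.getD k 0 + (tags.count k : Int) := by
  induction tags generalizing d with
  | nil => simp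
  | cons h t ih =>
    simp only [List.foldl_cons, ih, List.count_cons]
    by_cases hk : h = k
    · subst hk; simp; ring
    · simp [PySem.Dict.getD_insert, hk, Ne.symm hk]

-- A's running bitmap, from any start value, equals start + 1·count "C" + 2·count "python".
theorem bitmapFold (tags : List String) (b : Int) :
    tags.foldl (fun bitmap tag =>
      if tag = "C" then bitmap + ((1 : Int) <<< 0)
      else if tag = "python" then bitmap + ((1 : Int) <<< 1)
      else bitmap) b
      = b + (tags.count "C" : Int) * ((1 : Int) <<< 0) + (tags.count "python" : Int) * ((1 : Int) <<< 1) := by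
  induction tags generalizing b with
  | nil => simp
  | cons h t ih =>
    simp only [List.foldl_cons, List.count_cons]
    by_cases hC : h = "C" <;> by_cases hp : h = "python" <;>
      simp [hC, hp, ih] <;> ring

-- ===== VERDICT (by name: the statement is the Claim_ definition above) =====
theorem translate_tags_to_bitmap_spec : Claim_equal_translate_tags_to_bitmap := by
  intro tags _
  unfold Spec_translate_tags_to_bitmap translate_tags_to_bitmap translate_tags_to_bitmap_alt
  simp only [countsFold_getD, PySem.Dict.getD_empty]
  simpa using bitmapFold tags 0
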